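-- pv_equiv track=rewrite | github.com/GhostkillerMMIX/enterprise-soc-blueprint | soar/custom-apps/threat_intelligence_enrichment.py | _validate_hash
-- ===== SOURCE A (Python) =====
-- def _validate_hash(hash_value):
--     """
--     Validate hash format
--     """
--     if len(hash_value) == 32:  # MD5
--         return all(c in '0123456789abcdef' for c in hash_value.lower())
--     elif len(hash_value) == 40:  # SHA1
--         return all(c in '0123456789abcdef' for c in hash_value.lower())
--     elif len(hash_value) == 64:  # SHA256
--         return all(c in '0123456789abcdef' for c in hash_value.lower())
--     return False
-- ===== SOURCE B (Python) =====
-- import re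
--
-- _HEX_HASH_RE = re.compile(r'(?:[0-9a-fA-F]{32}|[0-9a-fA-F]{40}|[0-9a-fA-F]{64})\Z')
--
--
-- def _validate_hash(hash_value):
--     """
--     Validate hash format
--     """
--     return _HEX_HASH_RE.match(hash_value) is not None
-- ===== Notes on version B (the rewrite author's own statement) =====
-- stated objective: idiomatic
-- what changed: Replaces the three-way length dispatch with a per-character lower-then-scan by a single precompiled regex full-match over an alternation of the three fixed-length hex patterns (case-insensitive character class instead of .lower()).
import Mathlib
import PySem

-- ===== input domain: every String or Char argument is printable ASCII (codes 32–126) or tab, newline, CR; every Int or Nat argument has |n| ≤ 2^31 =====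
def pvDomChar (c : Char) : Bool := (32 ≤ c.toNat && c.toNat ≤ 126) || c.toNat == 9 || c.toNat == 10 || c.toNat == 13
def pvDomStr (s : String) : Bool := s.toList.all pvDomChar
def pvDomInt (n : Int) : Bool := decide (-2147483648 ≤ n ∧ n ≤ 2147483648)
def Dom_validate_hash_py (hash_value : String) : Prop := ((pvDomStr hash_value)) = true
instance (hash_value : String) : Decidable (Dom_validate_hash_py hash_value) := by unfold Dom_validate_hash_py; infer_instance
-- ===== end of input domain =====

-- B replaces A's three-way length dispatch + lower-then-scan with a single regex full-match
-- over an alternation of three fixed-length case-insensitive hex patterns (idiomatic; same cost).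


-- ===== PORT A =====
def validate_hash_py (hash_value : String) : Bool :=
  if PySem.Str.len hash_value == 32 then  -- MD5
    (PySem.Str.lower hash_value).toList.all (fun c => decide (c ∈ "0123456789abcdef".toList))
  else if PySem.Str.len hash_value == 40 then  -- SHA1
    (PySem.Str.lower hash_value).toList.all (fun c => decide (c ∈ "0123456789abcdef".toList))
  else if PySem.Str.len hash_value == 64 then  -- SHA256
    (PySem.Str.lower hash_value).toList.all (fun c => decide (c ∈ "0123456789abcdef".toList))
  else
    false

-- ===== PORT B =====
-- Exact semantics of the regex character class [0-9a-fA-F].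
def pvHexClassChar (c : Char) : Bool :=
  ('0' ≤ c && c ≤ '9') || ('a' ≤ c && c ≤ 'f') || ('A' ≤ c && c ≤ 'F')

-- Exact semantics of Source B's fixed pattern `(?:[0-9a-fA-F]{32}|[0-9a-fA-F]{40}|[0-9a-fA-F]{64})\Z`:
-- a full match exists iff the whole string is hex of one of the three lengths.
def validate_hash_py_alt (hash_value : String) : Bool :=
  (hash_value.toList.length == 32 || hash_value.toList.length == 40 || hash_value.toList.length == 64)
    && hash_value.toList.all pvHexClassChar

-- ===== PRECONDITION & SPEC =====
def Spec_validate_hash_py (hash_value : String) (out : Bool) : Prop := out = validate_hash_py_alt hash_value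
instance (hash_value : String) (out : Bool) : Decidable (Spec_validate_hash_py hash_value out) := by unfold Spec_validate_hash_py; infer_instance

-- ===== CLAIM (what is proved, stated in full; the proofs are below) =====
def Claim_equal_validate_hash_py : Prop := ∀ (hash_value : String), Dom_validate_hash_py hash_value → Spec_validate_hash_py hash_value (validate_hash_py hash_value)

-- ===== LEMMAS AND PROOFS =====

-- one character: lowering then testing lowercase-hex membership = the case-insensitive class
lemma lower_mem_hex_aux : ∀ n < 127,
    decide (PySem.Chars.lowerChar (Char.ofNat n) ∈ "0123456789abcdef".toList)
      = pvHexClassChar (Char.ofNat n) := by decide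

lemma lower_mem_hex (c : Char) (h : pvDomChar c = true) :
    decide (PySem.Chars.lowerChar c ∈ "0123456789abcdef".toList) = pvHexClassChar c := by
  have hn : c.toNat < 127 := by
    simp only [pvDomChar, Bool.or_eq_true, Bool.and_eq_true, decide_eq_true_eq, beq_iff_eq] at h
    omega
  have := lower_mem_hex_aux c.toNat hn
  rwa [Char.ofNat_toNat] at this

lemma all_lower_chars (l : List Char) (h : l.all pvDomChar = true) :
    (PySem.Chars.lower l).all (fun c => decide (c ∈ "0123456789abcdef".toList))
      = l.all pvHexClassChar := by
  induction l with
  | nil => rfl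
  | cons c t ih =>
      simp only [List.all_cons, Bool.and_eq_true] at h
      rw [show PySem.Chars.lower (c::t) = PySem.Chars.lowerChar c :: PySem.Chars.lower t from rfl,
          List.all_cons, List.all_cons, lower_mem_hex c h.1, ih h.2]

lemma all_lower_eq (s : String) (hd : Dom_validate_hash_py s) :
    (PySem.Str.lower s).toList.all (fun c => decide (c ∈ "0123456789abcdef".toList))
      = s.toList.all pvHexClassChar := by
  rw [PySem.Str.toList_lower]
  exact all_lower_chars s.toList hd

lemma len_beq (s : String) (k : Nat) :
    (PySem.Str.len s == (k : Int)) = (s.length == k) := by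
  simp [PySem.Str.len]

-- ===== VERDICT (by name: the statement is the Claim_ definition above) =====
theorem validate_hash_py_spec : Claim_equal_validate_hash_py := by
  intro s hd
  unfold Spec_validate_hash_py validate_hash_py validate_hash_py_alt
  rw [show ((32:Int) = ((32:Nat):Int)) by norm_num, len_beq,
      show ((40:Int) = ((40:Nat):Int)) by norm_num, len_beq,
      show ((64:Int) = ((64:Nat):Int)) by norm_num, len_beq,
      all_lower_eq s hd]
  by_cases h32 : s.length = 32 <;> by_cases h40 : s.length = 40 <;>
    by_cases h64 : s.length = 64 <;> simp [h32, h40, h64]
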